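-- pv_equiv track=rewrite | github.com/katarzynaadamczyk/AoC | Day_18/task1_2.py | checkforexplode
-- ===== SOURCE A (Python) =====
-- def checkforexplode(num):
--     numberofbrackets = 0
--     for i in range(len(num)):
--         if num[i] == '[':
--             numberofbrackets += 1
--             if numberofbrackets > 4:
--                 return i
--         elif num[i] == ']':
--             numberofbrackets -= 1
--
--     return -1
-- ===== SOURCE B (Python) =====
-- def checkforexplode(num):
--     # build the whole prefix-depth table, then search it
--     depths = []
--     d = 0
--     for c in num:
--         d += (c == '[') - (c == ']')
--         depths.append(d)
--     for i, d in enumerate(depths):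
--         if d > 4:
--             return i
--     return -1
-- ===== Notes on version B (the rewrite author's own statement) =====
-- stated objective: alternative
-- what changed: B replaces A's in-loop guarded counter (return inside the '[' branch) by a build-table-then-search decomposition: first compute the full prefix bracket-depth sequence, then scan it for the first index with depth > 4; correctness relies on the depth first exceeding 4 only at a '[' step.
import Mathlib
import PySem

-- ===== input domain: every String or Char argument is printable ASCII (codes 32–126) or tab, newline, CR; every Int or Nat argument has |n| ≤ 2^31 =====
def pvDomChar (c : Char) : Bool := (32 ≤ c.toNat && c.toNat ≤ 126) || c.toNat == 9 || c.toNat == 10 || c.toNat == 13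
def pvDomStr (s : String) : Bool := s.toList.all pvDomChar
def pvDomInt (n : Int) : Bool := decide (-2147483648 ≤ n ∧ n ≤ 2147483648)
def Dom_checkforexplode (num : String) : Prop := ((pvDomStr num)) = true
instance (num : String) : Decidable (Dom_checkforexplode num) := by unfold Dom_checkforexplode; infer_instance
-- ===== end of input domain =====

-- B builds the full prefix-depth table first and then searches it; A returns from inside the loop. Equivalence proved for all inputs.
-- ===== PORT A =====
-- loop over the characters, tracking index i and the running bracket counter; returns inside the '[' branch when the counter exceeds 4
def checkAGo (l : List Char) (i : Int) (n : Int) : Int :=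
  match l with
  | [] => -1
  | c :: rest =>
    if c = '[' then
      if n + 1 > 4 then i else checkAGo rest (i + 1) (n + 1)
    else if c = ']' then checkAGo rest (i + 1) (n - 1)
    else checkAGo rest (i + 1) n

def checkforexplode (num : String) : Int := checkAGo num.toList 0 0

-- ===== PORT B =====
-- first pass of Source B: build the list of running depths
def depthsB (l : List Char) (d : Int) : List Int :=
  match l with
  | [] => []
  | c :: rest =>
    let d' := d + (if c = '[' then 1 else 0) - (if c = ']' then 1 else 0)
    d' :: depthsB rest d'

-- second pass of Source B: first index whose depth exceeds 4, else -1
def searchB (l : List Int) (i : Int) : Int :=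
  match l with
  | [] => -1
  | d :: rest => if d > 4 then i else searchB rest (i + 1)

def checkforexplode_alt (num : String) : Int := searchB (depthsB num.toList 0) 0

-- ===== PRECONDITION & SPEC =====
def Spec_checkforexplode (num : String) (out : Int) : Prop := out = checkforexplode_alt num
instance (num : String) (out : Int) : Decidable (Spec_checkforexplode num out) := by unfold Spec_checkforexplode; infer_instance

-- ===== CLAIM (what is proved, stated in full; the proofs are below) =====
def Claim_equal_checkforexplode : Prop := ∀ (num : String), Dom_checkforexplode num → Spec_checkforexplode num (checkforexplode num)

-- ===== LEMMAS AND PROOFS =====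
theorem checkAGo_eq_searchB (l : List Char) (i n : Int) (hn : n ≤ 4) :
    checkAGo l i n = searchB (depthsB l n) i := by
  induction l generalizing i n with
  | nil => rfl
  | cons c rest ih =>
    simp only [checkAGo, depthsB, searchB]
    by_cases hb : c = '['
    · subst hb
      simp only [if_true, if_neg (by decide : ¬('[' : Char) = ']')]
      have e : n + (1 : Int) - 0 = n + 1 := by ring
      rw [e]
      split_ifs with h
      · rfl
      · exact ih _ _ (by omega)
    · by_cases hc : c = ']'
      · subst hc
        simp only [if_true, if_neg (by decide : ¬(']' : Char) = '[')]
        have e : n + (0 : Int) - 1 = n - 1 := by ring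
        rw [e, if_neg (by omega : ¬ (n - 1 > 4))]
        exact ih _ _ (by omega)
      · simp only [if_neg hb, if_neg hc]
        have e : n + (0 : Int) - 0 = n := by ring
        rw [e, if_neg (by omega : ¬ (n > 4))]
        exact ih _ _ hn

-- ===== VERDICT (by name: the statement is the Claim_ definition above) =====
theorem checkforexplode_spec : Claim_equal_checkforexplode := by
  intro num _
  unfold Spec_checkforexplode checkforexplode checkforexplode_alt
  exact checkAGo_eq_searchB _ 0 0 (by norm_num)
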